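-- pv_equiv track=rewrite | github.com/cawhitworth/weatherduino | analysis/serialparse.py | parse
-- ===== SOURCE A (Python) =====
-- def compareBits(this, last, diffmap):
--     if this == None or last == None:
--         return
--     for i in range(0, len(this)):
--         if this[i] != last[i]:
--             diffmap[i] = True
--
-- def parse(lines):
--     readingPacket = False
--     packet = None
--     header = None
--
--     longMap = [ False ] * 80
--     shortMap = [ False ] * 32
--
--     prevLong = None
--     prevShort = None
--
--     for line in lines:
--         l = line.rstrip()
--         if l.startswith("LONG PACKET") or l.startswith("SHORT PACKET"):
--             header = l
--             readingPacket = True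
--             packet = []
--
--         if readingPacket:
--             if len(l) == 0: #end of packet
--                 readingPacket = False
--                 if len(packet) not in (80, 32):
--                     raise "Not a valid dump"
--
--                 if len(packet) == 80:
--                     compareBits(packet, prevLong, longMap)
--                     prevLong = packet[:]
--                     compareBits(packet[48:], prevShort, shortMap)
--                     prevShort = packet[48:]
--
--                 if len(packet) == 32:
--                     compareBits(packet, prevShort, shortMap)
--                     prevShort = packet[:]
--
--             else:
--                 fields = l.split()
--                 packet += [ int(field) for field in fields if field in ("0","1") ]
--
--     return (longMap, shortMap)
-- ===== SOURCE B (Python) =====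
-- def parse(lines):
--     # Pass 1: collect completed packets (closed by a blank line), validating length.
--     packets = []
--     reading = False
--     cur = []
--     for line in lines:
--         l = line.rstrip()
--         if l.startswith("LONG PACKET") or l.startswith("SHORT PACKET"):
--             reading = True
--             cur = [int(t) for t in l.split() if t in ("0", "1")]
--         elif reading:
--             if l == "":
--                 reading = False
--                 if len(cur) not in (80, 32):
--                     raise ValueError("Not a valid dump")
--                 packets.append(cur)
--                 cur = []
--             else:
--                 cur += [int(t) for t in l.split() if t in ("0", "1")]
--     # Pass 2: fold over packets, comparing with the previous long/short packet.
--     longMap = [False] * 80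
--     shortMap = [False] * 32
--     prevLong = None
--     prevShort = None
--     for p in packets:
--         if len(p) == 80:
--             if prevLong is not None:
--                 longMap = [d or (a != b) for d, a, b in zip(longMap, p, prevLong)]
--             prevLong = p
--             tail = p[48:]
--             if prevShort is not None:
--                 shortMap = [d or (a != b) for d, a, b in zip(shortMap, tail, prevShort)]
--             prevShort = tail
--         else:
--             if prevShort is not None:
--                 shortMap = [d or (a != b) for d, a, b in zip(shortMap, p, prevShort)]
--             prevShort = p
--     return (longMap, shortMap)
-- ===== Notes on version B (the rewrite author's own statement) =====
-- stated objective: alternative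
-- what changed: Replaces A's single stateful scan (reading-flag state machine that compares and updates the diff maps in place as each packet closes, via an index-loop compareBits) with a two-pass decomposition: first collect the list of completed packets, then fold over them with (prevLong, prevShort) state, rebuilding the diff maps with a zip comprehension instead of index-wise in-place sets.
import Mathlib
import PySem

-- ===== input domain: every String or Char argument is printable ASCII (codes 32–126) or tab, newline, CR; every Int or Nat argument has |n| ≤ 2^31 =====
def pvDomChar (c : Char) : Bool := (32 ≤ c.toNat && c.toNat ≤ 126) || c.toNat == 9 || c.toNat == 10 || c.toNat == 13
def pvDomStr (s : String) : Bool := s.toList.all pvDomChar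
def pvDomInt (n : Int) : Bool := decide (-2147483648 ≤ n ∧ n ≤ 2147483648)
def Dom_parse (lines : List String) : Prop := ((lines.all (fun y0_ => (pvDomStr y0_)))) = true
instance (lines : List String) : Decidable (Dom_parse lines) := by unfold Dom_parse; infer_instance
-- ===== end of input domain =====

-- B replaces A's single stateful scan by a two-pass decomposition (collect completed packets,
-- then fold over them comparing neighbours) and rebuilds the diff maps with a zip comprehension
-- instead of index-wise in-place sets; objective: alternative decomposition, same cost.
-- Equal return value on Pre_parse (A raises "Not a valid dump" outside it, B raises ValueError);
-- neither implementation mutates its argument.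

-- ===== PORT A =====
-- the '[int(field) for field in fields if field in ("0","1")]' comprehension (fields = l.split())
def bitsA (l : String) : List Int :=
  ((PySem.Str.split₀ l).filter (fun t => t == "0" || t == "1")).map
    (fun t => (PySem.Int.ofStr? t).getD 0)  -- kept tokens are "0"/"1", so int() never raises

-- compareBits(this, last, diffmap): the loop indices range(0, len(this)) are Nats in range for
-- `this` and `diffmap`, and len(last) = len(this) at every call site, so getD/set are exact here
def compareBitsA (this : List Int) (last : Option (List Int)) (diffmap : List Bool) : List Bool :=
  match last with
  | none => diffmap
  | some lst =>
      (List.range this.length).foldl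
        (fun dm i => if this.getD i 0 ≠ lst.getD i 0 then dm.set i true else dm) diffmap

-- the for-loop of parse; the dead variable `header` is omitted (assigned, never read).
-- On the `raise "Not a valid dump"` branch (excluded by Pre_parse) the port skips the packet.
def loopA (lines : List String) (reading : Bool) (packet : Option (List Int))
    (prevLong prevShort : Option (List Int)) (longMap shortMap : List Bool) :
    List Bool × List Bool :=
  match lines with
  | [] => (longMap, shortMap)
  | line :: rest =>
    let l := PySem.Str.rstrip line
    let isHdr := PySem.Str.startswith l "LONG PACKET" || PySem.Str.startswith l "SHORT PACKET"
    let reading' := if isHdr then true else reading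
    let packet' := if isHdr then some ([] : List Int) else packet
    if reading' then
      if PySem.Str.len l = 0 then
        let pk := packet'.getD []
        if pk.length = 80 then
          loopA rest false packet' (some (PySem.List.slice pk (some 0) none))
            (some (PySem.List.slice pk (some 48) none))
            (compareBitsA pk prevLong longMap)
            (compareBitsA (PySem.List.slice pk (some 48) none) prevShort shortMap)
        else if pk.length = 32 then
          loopA rest false packet' prevLong (some (PySem.List.slice pk (some 0) none))
            longMap (compareBitsA pk prevShort shortMap)
        else loopA rest false packet' prevLong prevShort longMap shortMap
      else
        loopA rest reading' (some (packet'.getD [] ++ bitsA l)) prevLong prevShort longMap shortMap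
    else loopA rest reading' packet' prevLong prevShort longMap shortMap

def parse (lines : List String) : List Bool × List Bool :=
  loopA lines false none none none (List.replicate 80 false) (List.replicate 32 false)

-- ===== PORT B =====
def bitsB (l : String) : List Int :=
  ((PySem.Str.split₀ l).filter (fun t => t == "0" || t == "1")).map
    (fun t => (PySem.Int.ofStr? t).getD 0)

-- '[d or (a != b) for d, a, b in zip(diffmap, this, last)]'
def diffZipB : List Bool → List Int → List Int → List Bool
  | d :: ds, a :: as', b :: bs => (d || (a != b)) :: diffZipB ds as' bs
  | _, _, _ => []

-- pass 1: collect the completed packets (on the ValueError branch — outside Pre_parse — the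
-- Python raises; the port drops the packet and goes on)
def collectB (lines : List String) (reading : Bool) (cur : List Int)
    (packets : List (List Int)) : List (List Int) :=
  match lines with
  | [] => packets
  | line :: rest =>
    let l := PySem.Str.rstrip line
    if PySem.Str.startswith l "LONG PACKET" || PySem.Str.startswith l "SHORT PACKET" then
      collectB rest true (bitsB l) packets
    else if reading then
      if PySem.Str.len l = 0 then
        if cur.length = 80 ∨ cur.length = 32 then
          collectB rest false [] (packets ++ [cur])
        else collectB rest false [] packets
      else collectB rest reading (cur ++ bitsB l) packets
    else collectB rest reading cur packets

-- pass 2: fold over the packets with (prevLong, prevShort) state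
def foldB (packets : List (List Int)) (prevLong prevShort : Option (List Int))
    (longMap shortMap : List Bool) : List Bool × List Bool :=
  match packets with
  | [] => (longMap, shortMap)
  | p :: ps =>
    if p.length = 80 then
      let longMap' := match prevLong with | none => longMap | some q => diffZipB longMap p q
      let tail := PySem.List.slice p (some 48) none
      let shortMap' := match prevShort with | none => shortMap | some q => diffZipB shortMap tail q
      foldB ps (some p) (some tail) longMap' shortMap'
    else
      let shortMap' := match prevShort with | none => shortMap | some q => diffZipB shortMap p q
      foldB ps prevLong (some p) longMap shortMap'

def parse_alt (lines : List String) : List Bool × List Bool :=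
  foldB (collectB lines false [] []) none none (List.replicate 80 false) (List.replicate 32 false)

-- ===== PRECONDITION & SPEC =====
def pvHdr (s : String) : Bool :=
  PySem.Str.startswith (PySem.Str.rstrip s) "LONG PACKET" ||
  PySem.Str.startswith (PySem.Str.rstrip s) "SHORT PACKET"
def pvBlank (s : String) : Bool := PySem.Str.len (PySem.Str.rstrip s) == 0
def pvBitCount (s : String) : Nat :=
  ((PySem.Str.split₀ (PySem.Str.rstrip s)).filter (fun t => t == "0" || t == "1")).length
-- number of bits contributed by lines i..j-1
def pvSeg (lines : List String) (i j : Nat) : Nat :=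
  (((lines.drop i).take (j - i)).map pvBitCount).sum

-- Pre_parse excludes exactly the inputs on which A raises ("Not a valid dump", a TypeError in
-- Python 3): those where some blank line j closes a packet — started at the last header line i
-- before j with no blank or header line strictly between — whose bit count is neither 80 nor 32.
def Pre_parse (lines : List String) : Prop :=
  ((List.range lines.length).all (fun j => (List.range j).all (fun i =>
    !(pvHdr (lines.getD i "") && pvBlank (lines.getD j "") &&
        ((List.range j).all (fun k =>
          decide (k ≤ i) || (!pvHdr (lines.getD k "") && !pvBlank (lines.getD k ""))))) ||
    (pvSeg lines i j == 80 || pvSeg lines i j == 32)))) = true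
instance (lines : List String) : Decidable (Pre_parse lines) := by
  unfold Pre_parse; infer_instance

def pvWitness_parse : List String :=
  ["SHORT PACKET at 5", "0 1 0 1 0 1 0 1", "1 1 1 1 0 0 0 0",
   "0 0 0 0 1 1 1 1", "1 0 1 0 1 0 1 0", ""]

def Spec_parse (lines : List String) (out : List Bool × List Bool) : Prop := out = parse_alt lines
instance (lines : List String) (out : List Bool × List Bool) : Decidable (Spec_parse lines out) := by unfold Spec_parse; infer_instance

-- ===== CLAIM (what is proved, stated in full; the proofs are below) =====
def Claim_equal_parse : Prop := ∀ (lines : List String), Dom_parse lines → Pre_parse lines → Spec_parse lines (parse lines)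

-- ===== LEMMAS AND PROOFS =====

theorem bitsA_eq_bitsB : bitsA = bitsB := rfl

theorem slice_from_48 (pk : List Int) : PySem.List.slice pk (some 48) none = pk.drop 48 := by
  rw [PySem.List.slice_from pk (show (0:ℤ) ≤ 48 by norm_num)]; simp

theorem slice_from_0 (pk : List Int) : PySem.List.slice pk (some 0) none = pk := by simp

theorem hdr_len_ne (l : String)
    (h : (PySem.Str.startswith l "LONG PACKET" || PySem.Str.startswith l "SHORT PACKET") = true) :
    ¬ PySem.Str.len l = 0 := by
  rcases Bool.or_eq_true_iff.mp h with h' | h' <;>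
  · rw [PySem.Str.startswith_eq] at h'
    have hle := ((PySem.Chars.startswith_iff _ _).mp h').length_le
    rw [PySem.Str.len_eq]
    have h11 : 1 ≤ l.toList.length := by refine le_trans ?_ hle; decide
    omega

-- acc-free form of pass 1 (proof helper)
def collectSeg : List String → Bool → List Int → List (List Int)
  | [], _, _ => []
  | line :: rest, reading, cur =>
    let l := PySem.Str.rstrip line
    if PySem.Str.startswith l "LONG PACKET" || PySem.Str.startswith l "SHORT PACKET" then
      collectSeg rest true (bitsB l)
    else if reading then
      if PySem.Str.len l = 0 then
        if cur.length = 80 ∨ cur.length = 32 then cur :: collectSeg rest false []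
        else collectSeg rest false []
      else collectSeg rest reading (cur ++ bitsB l)
    else collectSeg rest reading cur

theorem collectB_eq (lines : List String) : ∀ (reading : Bool) (cur : List Int)
    (packets : List (List Int)),
    collectB lines reading cur packets = packets ++ collectSeg lines reading cur := by
  induction lines with
  | nil => intro r c p; simp [collectB, collectSeg]
  | cons line rest ih =>
    intro r c p
    simp only [collectB, collectSeg]
    split_ifs <;> simp [ih]

-- pointwise characterisation of the foldl-with-set in compareBitsA
theorem length_foldl_set (this lst : List Int) (n : ℕ) (dm : List Bool) :
    ((List.range n).foldl
      (fun dm i => if this.getD i 0 ≠ lst.getD i 0 then dm.set i true else dm) dm).length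
      = dm.length := by
  induction n generalizing dm with
  | zero => simp
  | succ n ih =>
    rw [List.range_succ, List.foldl_append, List.foldl_cons, List.foldl_nil]
    by_cases h : this.getD n 0 ≠ lst.getD n 0
    · rw [if_pos h, List.length_set]; exact ih dm
    · rw [if_neg h]; exact ih dm

theorem getD_foldl_set (this lst : List Int) (n : ℕ) (dm : List Bool) (hn : n ≤ dm.length)
    (j : ℕ) :
    ((List.range n).foldl
      (fun dm i => if this.getD i 0 ≠ lst.getD i 0 then dm.set i true else dm) dm).getD j false
      = (dm.getD j false || (decide (j < n) && decide (this.getD j 0 ≠ lst.getD j 0))) := by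
  induction n generalizing dm with
  | zero => simp
  | succ n ih =>
    rw [List.range_succ, List.foldl_append, List.foldl_cons, List.foldl_nil]
    have hlen := length_foldl_set this lst n dm
    by_cases h : this.getD n 0 ≠ lst.getD n 0
    · rw [if_pos h]
      by_cases hj : j = n
      · subst hj
        rw [List.getD_eq_getElem _ _ (by rw [List.length_set, hlen]; omega)]
        rw [List.getElem_set_self (h := by rw [List.length_set, hlen]; omega)]
        have h2 : decide (j < j + 1) = true := by simp
        have h3 : decide (this.getD j 0 ≠ lst.getD j 0) = true := by simpa using h
        rw [h2, h3, Bool.true_and, Bool.or_true]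
      · rw [List.getD, List.getElem?_set_ne (by omega)]
        rw [← List.getD, ih dm (by omega) ]
        have : decide (j < n + 1) = decide (j < n) := by
          by_cases hlt : j < n
          · simp [hlt, Nat.lt_succ_of_lt hlt]
          · have : ¬ j < n + 1 := by omega
            simp [hlt, this]
        rw [this]
    · rw [if_neg h]
      rw [ih dm (by omega)]
      by_cases hj : j = n
      · subst hj
        have : decide (this.getD j 0 ≠ lst.getD j 0) = false := by simpa using h
        rw [this]
        simp
      · have : decide (j < n + 1) = decide (j < n) := by
          by_cases hlt : j < n
          · simp [hlt, Nat.lt_succ_of_lt hlt]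
          · have : ¬ j < n + 1 := by omega
            simp [hlt, this]
        rw [this]

theorem length_diffZipB (dm : List Bool) (p q : List Int) (h1 : dm.length = p.length)
    (h2 : p.length = q.length) : (diffZipB dm p q).length = dm.length := by
  induction dm generalizing p q with
  | nil => simp [diffZipB]
  | cons d ds ih =>
    cases p with
    | nil => simp at h1
    | cons a as =>
      cases q with
      | nil => simp at h2
      | cons b bs =>
        simp only [diffZipB, List.length_cons]
        rw [ih as bs (by simpa using h1) (by simpa using h2)]

theorem getD_diffZipB (dm : List Bool) (p q : List Int) (h1 : dm.length = p.length)
    (h2 : p.length = q.length) (j : ℕ) :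
    (diffZipB dm p q).getD j false
      = (dm.getD j false || (decide (j < dm.length) && decide (p.getD j 0 ≠ q.getD j 0))) := by
  induction dm generalizing p q j with
  | nil => simp [diffZipB]
  | cons d ds ih =>
    cases p with
    | nil => simp at h1
    | cons a as =>
      cases q with
      | nil => simp at h2
      | cons b bs =>
        cases j with
        | zero => by_cases hab : a = b <;> simp [diffZipB, hab, bne]
        | succ j =>
          simp only [diffZipB, List.getD_cons_succ, List.length_cons]
          rw [ih as bs (by simpa using h1) (by simpa using h2) j]
          congr 2
          simp

theorem compareBitsA_eq (p q : List Int) (dm : List Bool) (h1 : dm.length = p.length)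
    (h2 : p.length = q.length) : compareBitsA p (some q) dm = diffZipB dm p q := by
  unfold compareBitsA
  apply List.ext_getElem
  · rw [length_foldl_set, length_diffZipB dm p q h1 h2]
  · intro n hn1 hn2
    rw [← List.getD_eq_getElem _ false hn1, ← List.getD_eq_getElem _ false hn2]
    rw [getD_foldl_set p q p.length dm (by omega), getD_diffZipB dm p q h1 h2 n, h1]

-- state invariant carried by the main induction
def pvInv (prevLong prevShort : Option (List Int)) (longMap shortMap : List Bool) : Prop :=
  (∀ q, prevLong = some q → q.length = 80) ∧ (∀ q, prevShort = some q → q.length = 32) ∧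
  longMap.length = 80 ∧ shortMap.length = 32

theorem loopA_eq (lines : List String) : ∀ (reading : Bool) (packet : Option (List Int))
    (cur : List Int) (prevLong prevShort : Option (List Int)) (longMap shortMap : List Bool),
    (reading = true → packet = some cur) → pvInv prevLong prevShort longMap shortMap →
    loopA lines reading packet prevLong prevShort longMap shortMap
      = foldB (collectSeg lines reading cur) prevLong prevShort longMap shortMap := by
  induction lines with
  | nil => intro r pkt c pl ps lm sm _ _; simp [loopA, collectSeg, foldB]
  | cons line rest ih =>
    intro r pkt c pl ps lm sm hrel hinv
    obtain ⟨hpl, hps, hlm, hsm⟩ := hinv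
    simp only [loopA, collectSeg]
    by_cases hH : (PySem.Str.startswith (PySem.Str.rstrip line) "LONG PACKET" ||
        PySem.Str.startswith (PySem.Str.rstrip line) "SHORT PACKET") = true
    · rw [if_pos hH]
      simp only [hH, if_true]
      rw [if_neg (hdr_len_ne _ hH)]
      simp only [Option.getD_some, List.nil_append]
      rw [← bitsA_eq_bitsB]
      exact ih true (some (bitsA (PySem.Str.rstrip line))) (bitsA (PySem.Str.rstrip line))
        pl ps lm sm (fun _ => rfl) ⟨hpl, hps, hlm, hsm⟩
    · rw [if_neg hH]
      simp only [Bool.not_eq_true] at hH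
      simp only [hH, Bool.false_eq_true, if_false]
      cases r with
      | false =>
        simp only [Bool.false_eq_true, if_false]
        exact ih false pkt c pl ps lm sm (by simp) ⟨hpl, hps, hlm, hsm⟩
      | true =>
        have hpkt : pkt = some c := hrel rfl
        subst hpkt
        simp only [if_true, Option.getD_some]
        by_cases hB : PySem.Str.len (PySem.Str.rstrip line) = 0
        · rw [if_pos hB, if_pos hB]
          by_cases h80 : c.length = 80
          · rw [if_pos h80, if_pos (Or.inl h80)]
            simp only [foldB, if_pos h80, slice_from_0]
            rw [slice_from_48]
            have hinv' : ∀ (lm' sm' : List Bool), lm'.length = 80 → sm'.length = 32 →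
                loopA rest false (some c) (some c) (some (c.drop 48)) lm' sm'
                  = foldB (collectSeg rest false []) (some c) (some (c.drop 48)) lm' sm' := by
              intro lm' sm' hl1 hl2
              exact ih false (some c) [] (some c) (some (c.drop 48)) lm' sm' (by simp)
                ⟨by intro q hq; cases hq; exact h80,
                 by intro q hq; cases hq; simp [h80], hl1, hl2⟩
            cases pl with
            | none =>
              cases ps with
              | none => exact hinv' lm sm hlm hsm
              | some qps =>
                rw [compareBitsA_eq (c.drop 48) qps sm (by simp [h80, hsm])
                  (by simp [h80, hps qps rfl])]
                exact hinv' lm (diffZipB sm (c.drop 48) qps) hlm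
                  ((length_diffZipB sm (c.drop 48) qps (by simp [h80, hsm])
                    (by simp [h80, hps qps rfl])).trans hsm)
            | some qpl =>
              rw [compareBitsA_eq c qpl lm (by omega) (by rw [h80, hpl qpl rfl])]
              cases ps with
              | none =>
                exact hinv' (diffZipB lm c qpl) sm
                  ((length_diffZipB lm c qpl (by omega) (by rw [h80, hpl qpl rfl])).trans hlm) hsm
              | some qps =>
                rw [compareBitsA_eq (c.drop 48) qps sm (by simp [h80, hsm])
                  (by simp [h80, hps qps rfl])]
                exact hinv' (diffZipB lm c qpl) (diffZipB sm (c.drop 48) qps)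
                  ((length_diffZipB lm c qpl (by omega) (by rw [h80, hpl qpl rfl])).trans hlm)
                  ((length_diffZipB sm (c.drop 48) qps (by simp [h80, hsm])
                    (by simp [h80, hps qps rfl])).trans hsm)
          · rw [if_neg h80]
            by_cases h32 : c.length = 32
            · rw [if_pos h32, if_pos (Or.inr h32)]
              simp only [foldB, if_neg h80, slice_from_0]
              have hinv' : ∀ (sm' : List Bool), sm'.length = 32 →
                  loopA rest false (some c) pl (some c) lm sm'
                    = foldB (collectSeg rest false []) pl (some c) lm sm' := by
                intro sm' hl2
                exact ih false (some c) [] pl (some c) lm sm' (by simp)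
                  ⟨hpl, by intro q hq; cases hq; exact h32, hlm, hl2⟩
              cases ps with
              | none => exact hinv' sm hsm
              | some qps =>
                rw [compareBitsA_eq c qps sm (by omega) (by rw [h32, hps qps rfl])]
                exact hinv' (diffZipB sm c qps)
                  ((length_diffZipB sm c qps (by omega) (by rw [h32, hps qps rfl])).trans hsm)
            · rw [if_neg h32, if_neg (by rintro (h | h) <;> omega)]
              exact ih false (some c) [] pl ps lm sm (by simp) ⟨hpl, hps, hlm, hsm⟩
        · rw [if_neg hB, if_neg hB, ← bitsA_eq_bitsB]
          exact ih true (some (c ++ bitsA (PySem.Str.rstrip line)))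
            (c ++ bitsA (PySem.Str.rstrip line)) pl ps lm sm (fun _ => rfl)
            ⟨hpl, hps, hlm, hsm⟩

-- ===== VERDICT (by name: the statement is the Claim_ definition above) =====
theorem parse_spec : Claim_equal_parse := by
  intro lines _ _
  unfold Spec_parse parse parse_alt
  rw [collectB_eq, List.nil_append]
  exact loopA_eq lines false none [] none none _ _ (by simp)
    ⟨by simp, by simp, by simp, by simp⟩
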